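-- pv_equiv track=rewrite | github.com/mohammadJaliliTorkamani/CASEY-Tool | noise_dead_code.py | _insert_java
-- ===== SOURCE A (Python) =====
-- def _insert_java(code):
--     noise = "\n        if(false) { System.out.println(0); }"
--     code_lines = code.split("\n")
--     for i, line in enumerate(code_lines):
--         if "{" in line:
--             code_lines.insert(i + 1, noise)
--             break
--     return "\n".join(code_lines)
-- ===== SOURCE B (Python) =====
-- def _insert_java(code):
--     noise = "\n        if(false) { System.out.println(0); }"
--     idx = code.find('{')
--     if idx == -1:
--         return code
--     nl = code.find('\n', idx)
--     if nl == -1: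
--         return code + '\n' + noise
--     return code[:nl + 1] + noise + '\n' + code[nl + 1:]
-- ===== Notes on version B (the rewrite author's own statement) =====
-- stated objective: alternative
-- what changed: B never builds a list of lines: it locates the first opening brace and the following line break with two raw-string find calls and splices the noise in with slice concatenation, instead of split / scan lines / insert / join.
import Mathlib
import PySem

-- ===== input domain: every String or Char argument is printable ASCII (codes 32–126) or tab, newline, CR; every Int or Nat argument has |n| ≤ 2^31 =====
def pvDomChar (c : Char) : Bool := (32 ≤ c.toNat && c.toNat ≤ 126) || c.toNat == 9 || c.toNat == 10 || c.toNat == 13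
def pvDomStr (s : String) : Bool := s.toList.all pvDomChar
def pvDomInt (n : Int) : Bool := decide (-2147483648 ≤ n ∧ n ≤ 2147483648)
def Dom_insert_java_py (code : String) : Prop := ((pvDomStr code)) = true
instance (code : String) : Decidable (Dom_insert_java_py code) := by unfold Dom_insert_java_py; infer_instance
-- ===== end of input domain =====

-- B replaces A's split-into-lines / scan / insert / join pipeline by two raw-string find calls
-- and a slice concatenation: a different decomposition of the same task, not claimed faster.

-- ===== PORT A =====
-- the noise literal both Pythons spell out
def pvNoise : List Char := "\n        if(false) { System.out.println(0); }".toList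

-- A's loop: walk the lines, insert noise after the first line containing "{", then stop
def pvALoop (noise : List Char) : List (List Char) → List (List Char)
  | [] => []
  | l :: ls =>
      if PySem.Chars.isIn ['{'] l then l :: noise :: ls
      else l :: pvALoop noise ls

def insert_java_py (code : String) : String :=
  String.ofList
    (PySem.Chars.join ['\n']
      (pvALoop pvNoise (PySem.Chars.splitOn code.toList ['\n'])))

-- ===== PORT B =====
def insert_java_py_alt (code : String) : String :=
  let cs := code.toList
  let idx := PySem.Chars.find cs ['{']
  if idx = -1 then code
  else
    let nl := PySem.Chars.findFrom cs ['\n'] idx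
    if nl = -1 then String.ofList (cs ++ '\n' :: pvNoise)
    else
      String.ofList
        (PySem.List.slice cs none (some (nl + 1)) ++ pvNoise ++
          '\n' :: PySem.List.slice cs (some (nl + 1)) none)

-- ===== PRECONDITION & SPEC =====
def Spec_insert_java_py (code : String) (out : String) : Prop := out = insert_java_py_alt code
instance (code : String) (out : String) : Decidable (Spec_insert_java_py code out) := by unfold Spec_insert_java_py; infer_instance

-- ===== CLAIM (what is proved, stated in full; the proofs are below) =====
def Claim_equal_insert_java_py : Prop := ∀ (code : String), Dom_insert_java_py code → Spec_insert_java_py code (insert_java_py code)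

-- ===== LEMMAS AND PROOFS =====

-- split a char list at the first newline: (first line, remaining lines)
def pvF : List Char → List Char × List (List Char)
  | [] => ([], [])
  | x :: r => if x = '\n' then ([], (pvF r).1 :: (pvF r).2) else (x :: (pvF r).1, (pvF r).2)

theorem pvGo_eq : ∀ (fuel : Nat) (l cur : List Char) (acc : List (List Char)),
    l.length < fuel →
    PySem.Chars.splitOn.go ['\n'] fuel l cur acc
      = acc.reverse ++ (cur.reverse ++ (pvF l).1) :: (pvF l).2 := by
  intro fuel
  induction fuel with
  | zero => intro l cur acc h; omega
  | succ n ih =>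
      intro l cur acc h
      cases l with
      | nil => simp [PySem.Chars.splitOn.go, pvF]
      | cons x r =>
          by_cases hx : x = '\n'
          · subst hx
            simp only [PySem.Chars.splitOn.go, List.isPrefixOf, beq_self_eq_true,
              Bool.true_and, if_pos]
            have hd : List.drop ['\n'].length ('\n' :: r) = r := rfl
            rw [hd, ih r [] (cur.reverse :: acc) (by simpa using Nat.lt_of_succ_lt_succ h)]
            simp [pvF]
          · simp only [PySem.Chars.splitOn.go, List.isPrefixOf]
            rw [if_neg (by simp; exact fun he => hx he.symm)]
            rw [ih r (x :: cur) acc (by simpa using Nat.lt_of_succ_lt_succ h)]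
            simp [pvF, hx]

theorem pvSplitOn_eq (cs : List Char) :
    PySem.Chars.splitOn cs ['\n'] = (pvF cs).1 :: (pvF cs).2 := by
  unfold PySem.Chars.splitOn
  rw [pvGo_eq (cs.length + 1) cs [] [] (by omega)]
  simp

theorem pvFindGo_not_mem {c : Char} : ∀ (l : List Char) (k : Nat),
    c ∉ l → PySem.Chars.find.go [c] l k = -1 := by
  intro l
  induction l with
  | nil => intro k _; simp [PySem.Chars.find.go]
  | cons x r ih =>
      intro k h
      simp only [PySem.Chars.find.go, List.isPrefixOf, Bool.and_true]
      rw [if_neg (by simp; intro he; exact h (by simp [he]))]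
      exact ih (k + 1) (by intro hm; exact h (by simp [hm]))

theorem pvFindGo_first {c : Char} : ∀ (a : List Char) (b : List Char) (k : Nat),
    c ∉ a → PySem.Chars.find.go [c] (a ++ c :: b) k = k + a.length := by
  intro a
  induction a with
  | nil => intro b k _; simp [PySem.Chars.find.go, List.isPrefixOf]
  | cons x r ih =>
      intro b k h
      simp only [List.cons_append, PySem.Chars.find.go, List.isPrefixOf, Bool.and_true]
      rw [if_neg (by simp; intro he; exact h (by simp [he]))]
      rw [ih b (k + 1) (by intro hm; exact h (by simp [hm]))]
      simp only [List.length_cons]; push_cast; ring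

theorem pvFind_not_mem {c : Char} {cs : List Char} (h : c ∉ cs) :
    PySem.Chars.find cs [c] = -1 := pvFindGo_not_mem cs 0 h

theorem pvFind_first {c : Char} {a : List Char} (b : List Char) (h : c ∉ a) :
    PySem.Chars.find (a ++ c :: b) [c] = (a.length : Int) := by
  unfold PySem.Chars.find
  rw [pvFindGo_first a b 0 h]; simp

theorem pvIsIn_false {x : Char} {l : List Char} (h : x ∉ l) :
    PySem.Chars.isIn [x] l = false := by
  simp [PySem.Chars.isIn, pvFind_not_mem h]

theorem pvFirst_split {x : Char} : ∀ {l : List Char}, x ∈ l →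
    ∃ a b, l = a ++ x :: b ∧ x ∉ a := by
  intro l
  induction l with
  | nil => intro h; simp at h
  | cons y r ih =>
      intro h
      by_cases hy : y = x
      · exact ⟨[], r, by simp [hy], by simp⟩
      · obtain ⟨a, b, hab, hna⟩ := ih (by
          rcases List.mem_cons.mp h with h' | h'
          · exact absurd h'.symm hy
          · exact h')
        refine ⟨y :: a, b, by simp [hab], ?_⟩
        simp only [List.mem_cons, not_or]
        exact ⟨fun he => hy he.symm, hna⟩

theorem pvIsIn_true {x : Char} {l : List Char} (h : x ∈ l) :
    PySem.Chars.isIn [x] l = true := by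
  obtain ⟨a, b, hab, hna⟩ := pvFirst_split h
  subst hab
  simp [PySem.Chars.isIn, pvFind_first b hna]

theorem pvF_no_nl : ∀ {cs : List Char}, '\n' ∉ cs → pvF cs = (cs, []) := by
  intro cs
  induction cs with
  | nil => intro _; simp [pvF]
  | cons x r ih =>
      intro h
      have hx : ¬ x = '\n' := fun he => h (by simp [he])
      simp [pvF, hx, ih (fun hm => h (by simp [hm]))]

theorem pvF_split : ∀ {p : List Char} (q : List Char), '\n' ∉ p →
    pvF (p ++ '\n' :: q) = (p, (pvF q).1 :: (pvF q).2) := by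
  intro p
  induction p with
  | nil => intro q _; simp [pvF]
  | cons x r ih =>
      intro q h
      have hx : ¬ x = '\n' := fun he => h (by simp [he])
      simp [pvF, hx, ih q (fun hm => h (by simp [hm]))]

theorem pvJoin_pvF : ∀ (cs : List Char),
    PySem.Chars.join ['\n'] ((pvF cs).1 :: (pvF cs).2) = cs := by
  intro cs
  induction cs with
  | nil => simp [pvF, PySem.Chars.join_singleton]
  | cons x r ih =>
      by_cases hx : x = '\n'
      · subst hx
        have hpf : pvF ('\n' :: r) = ([], (pvF r).1 :: (pvF r).2) := by simp [pvF]
        rw [hpf, PySem.Chars.join_cons_cons, ih]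
        simp
      · have hpf : pvF (x :: r) = (x :: (pvF r).1, (pvF r).2) := by simp [pvF, hx]
        rw [hpf]
        rcases hr : (pvF r).2 with _ | ⟨h2, t2⟩
        · rw [hr] at ih
          rw [PySem.Chars.join_singleton]
          rw [PySem.Chars.join_singleton] at ih
          simp [ih]
        · rw [hr] at ih
          rw [PySem.Chars.join_cons_cons]
          rw [PySem.Chars.join_cons_cons] at ih
          simpa using congrArg (x :: ·) ih

theorem pvALoop_ne_nil (noise : List Char) (l : List Char) (ls : List (List Char)) :
    pvALoop noise (l :: ls) ≠ [] := by
  unfold pvALoop; split <;> simp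

theorem pvJoin_cons (p : List Char) (L : List (List Char)) (h : L ≠ []) :
    PySem.Chars.join ['\n'] (p :: L) = p ++ '\n' :: PySem.Chars.join ['\n'] L := by
  cases L with
  | nil => exact absurd rfl h
  | cons q t => rw [PySem.Chars.join_cons_cons]; simp

-- B's char-level result, named for the induction
def pvB (cs : List Char) : List Char :=
  if PySem.Chars.find cs ['{'] = -1 then cs
  else if PySem.Chars.findFrom cs ['\n'] (PySem.Chars.find cs ['{']) = -1 then
    cs ++ '\n' :: pvNoise
  else
    PySem.List.slice cs none (some (PySem.Chars.findFrom cs ['\n'] (PySem.Chars.find cs ['{']) + 1)) ++ pvNoise ++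
      '\n' :: PySem.List.slice cs (some (PySem.Chars.findFrom cs ['\n'] (PySem.Chars.find cs ['{']) + 1)) none

theorem pvB_none {cs : List Char} (h : '{' ∉ cs) : pvB cs = cs := by
  simp [pvB, pvFind_not_mem h]

theorem pvB_nonl (a b : List Char) (hna : '{' ∉ a) (hnb : '\n' ∉ '{' :: b) :
    pvB (a ++ '{' :: b) = (a ++ '{' :: b) ++ '\n' :: pvNoise := by
  have hfind : PySem.Chars.find (a ++ '{' :: b) ['{'] = (a.length : Int) :=
    pvFind_first b hna
  have hk : a.length ≤ (a ++ '{' :: b).length := by simp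
  have hdrop : List.drop a.length (a ++ '{' :: b) = '{' :: b := List.drop_left
  have hff : PySem.Chars.findFrom (a ++ '{' :: b) ['\n'] (a.length : Int) = -1 := by
    rw [PySem.Chars.findFrom_natCast _ _ a.length hk, hdrop, pvFind_not_mem hnb]
    simp
  unfold pvB
  rw [hfind, if_neg (by omega), hff, if_pos rfl]

theorem pvB_nl (a w' v : List Char) (hna : '{' ∉ a) (hw : '\n' ∉ '{' :: w') :
    pvB (a ++ '{' :: (w' ++ '\n' :: v)) =
      (a ++ '{' :: (w' ++ ['\n'])) ++ pvNoise ++ '\n' :: v := by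
  have hfind : PySem.Chars.find (a ++ '{' :: (w' ++ '\n' :: v)) ['{'] = (a.length : Int) :=
    pvFind_first _ hna
  have hk : a.length ≤ (a ++ '{' :: (w' ++ '\n' :: v)).length := by simp
  have hdrop : List.drop a.length (a ++ '{' :: (w' ++ '\n' :: v)) = '{' :: (w' ++ '\n' :: v) :=
    List.drop_left
  have hfind2 : PySem.Chars.find ('{' :: (w' ++ '\n' :: v)) ['\n'] = ((w'.length + 1 : Nat) : Int) := by
    have := pvFind_first (a := '{' :: w') v hw
    simpa using this
  have hff : PySem.Chars.findFrom (a ++ '{' :: (w' ++ '\n' :: v)) ['\n'] (a.length : Int)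
      = ((a.length + w'.length + 1 : Nat) : Int) := by
    rw [PySem.Chars.findFrom_natCast _ _ a.length hk, hdrop, hfind2]
    rw [if_neg (by omega)]
    push_cast; ring
  have harr : (a ++ '{' :: (w' ++ '\n' :: v)) = (a ++ '{' :: (w' ++ ['\n'])) ++ v := by
    simp
  have hlen : (a ++ '{' :: (w' ++ ['\n'])).length = a.length + w'.length + 2 := by
    simp; omega
  unfold pvB
  rw [hfind, if_neg (by omega), hff, if_neg (by omega)]
  have hcast : ((a.length + w'.length + 1 : Nat) : Int) + 1 = ((a.length + w'.length + 2 : Nat) : Int) := by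
    push_cast; ring
  rw [hcast, PySem.List.slice_to_natCast, PySem.List.slice_from_natCast]
  rw [harr, List.take_left' hlen, List.drop_left' hlen]

theorem pvB_step (p q : List Char) (hbp : '{' ∉ p) :
    pvB (p ++ '\n' :: q) = p ++ '\n' :: pvB q := by
  by_cases hbq : '{' ∈ q
  · obtain ⟨a, b, hab, hna⟩ := pvFirst_split hbq
    subst hab
    have hna' : '{' ∉ p ++ '\n' :: a := by
      simp only [List.mem_cons, List.mem_append, not_or]
      exact ⟨hbp, by simp, hna⟩
    by_cases hnn : '\n' ∈ '{' :: b
    · obtain ⟨w, v, hwv, hw⟩ := pvFirst_split hnn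
      cases w with
      | nil => simp at hwv
      | cons w0 w' =>
          have hw0 : w0 = '{' := by
            have := congrArg (fun l => l.head?) hwv
            simpa using this.symm
          subst hw0
          have hb : b = w' ++ '\n' :: v := by
            have := congrArg List.tail hwv
            simpa using this
          subst hb
          have h1 : pvB (p ++ '\n' :: (a ++ '{' :: (w' ++ '\n' :: v)))
              = ((p ++ '\n' :: a) ++ '{' :: (w' ++ ['\n'])) ++ pvNoise ++ '\n' :: v := by
            have := pvB_nl (p ++ '\n' :: a) w' v hna' hw
            simpa using this
          rw [h1, pvB_nl a w' v hna hw]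
          simp
    · have h1 : pvB (p ++ '\n' :: (a ++ '{' :: b))
          = ((p ++ '\n' :: a) ++ '{' :: b) ++ '\n' :: pvNoise := by
        have := pvB_nonl (p ++ '\n' :: a) b hna' hnn
        simpa using this
      rw [h1, pvB_nonl a b hna hnn]
      simp
  · have hno : '{' ∉ p ++ '\n' :: q := by
      simp only [List.mem_cons, List.mem_append, not_or]
      exact ⟨hbp, by simp, hbq⟩
    rw [pvB_none hno, pvB_none hbq]

theorem pvMain : ∀ (n : Nat) (cs : List Char), cs.length ≤ n →
    PySem.Chars.join ['\n'] (pvALoop pvNoise ((pvF cs).1 :: (pvF cs).2)) = pvB cs := by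
  intro n
  induction n with
  | zero =>
      intro cs h
      have hcs : cs = [] := List.eq_nil_of_length_eq_zero (Nat.le_zero.mp h)
      subst hcs
      have : pvF ([] : List Char) = ([], []) := rfl
      rw [this, pvB_none (by simp)]
      have hal : pvALoop pvNoise [([] : List Char)] = [[]] := by
        simp [pvALoop, pvIsIn_false (by simp : '{' ∉ ([] : List Char))]
      rw [hal, PySem.Chars.join_singleton]
  | succ n ih =>
      intro cs h
      by_cases hn : '\n' ∈ cs
      · obtain ⟨p, q, hpq, hp⟩ := pvFirst_split hn
        subst hpq
        rw [pvF_split q hp]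
        by_cases hbp : '{' ∈ p
        · have hal : pvALoop pvNoise (p :: (pvF q).1 :: (pvF q).2)
              = p :: pvNoise :: (pvF q).1 :: (pvF q).2 := by
            simp [pvALoop, pvIsIn_true hbp]
          rw [hal, PySem.Chars.join_cons_cons, PySem.Chars.join_cons_cons, pvJoin_pvF]
          obtain ⟨a, b', hab, hna⟩ := pvFirst_split hbp
          subst hab
          have hw : '\n' ∉ '{' :: b' := by
            simp only [List.mem_cons, not_or]
            refine ⟨by simp, fun hm => hp ?_⟩
            simp [hm]
          have h1 : pvB ((a ++ '{' :: b') ++ '\n' :: q)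
              = (a ++ '{' :: (b' ++ ['\n'])) ++ pvNoise ++ '\n' :: q := by
            have := pvB_nl a b' q hna hw
            simpa using this
          rw [h1]
          simp
        · have hal : pvALoop pvNoise (p :: (pvF q).1 :: (pvF q).2)
              = p :: pvALoop pvNoise ((pvF q).1 :: (pvF q).2) := by
            simp [pvALoop, pvIsIn_false hbp]
          rw [hal, pvJoin_cons p _ (pvALoop_ne_nil _ _ _)]
          have hq : q.length ≤ n := by
            have := h
            simp only [List.length_append, List.length_cons] at this
            omega
          rw [ih q hq, pvB_step p q hbp]
      · rw [pvF_no_nl hn]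
        by_cases hb : '{' ∈ cs
        · have hal : pvALoop pvNoise [cs] = [cs, pvNoise] := by
            simp [pvALoop, pvIsIn_true hb]
          rw [hal, PySem.Chars.join_cons_cons, PySem.Chars.join_singleton]
          obtain ⟨a, b, hab, hna⟩ := pvFirst_split hb
          subst hab
          have hnb : '\n' ∉ '{' :: b := by
            simp only [List.mem_cons, not_or]
            refine ⟨by simp, fun hm => hn ?_⟩
            simp [hm]
          rw [pvB_nonl a b hna hnb]
          simp
        · have hal : pvALoop pvNoise [cs] = [cs] := by
            simp [pvALoop, pvIsIn_false hb]
          rw [hal, PySem.Chars.join_singleton, pvB_none hb]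

theorem pvAlt_eq (code : String) : insert_java_py_alt code = String.ofList (pvB code.toList) := by
  by_cases h1 : PySem.Chars.find code.toList ['{'] = -1
  · simp [insert_java_py_alt, pvB, h1]
  · by_cases h2 : PySem.Chars.findFrom code.toList ['\n'] (PySem.Chars.find code.toList ['{']) = -1
    · simp [insert_java_py_alt, pvB, h1, h2]
    · simp [insert_java_py_alt, pvB, h1, h2]

theorem insert_java_py_spec : Claim_equal_insert_java_py := by
  intro code _
  unfold Spec_insert_java_py insert_java_py
  rw [pvSplitOn_eq, pvMain code.toList.length code.toList le_rfl, pvAlt_eq]
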